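-- pv_equiv track=rewrite | github.com/ssrskl/gym-flp-fbs | FbsEnv/utils/FBSUtil.py | permutationToArray
-- ===== SOURCE A (Python) =====
-- def permutationToArray(permutation, bay):
--     """将排列转换为二维数组"""
--     bay[-1] = 1  # 将bay的最后一个元素设置为1
--     array = []
--     start = 0
--     for i, val in enumerate(bay):
--         if val == 1:
--             array.append(permutation[start:i + 1])
--             start = i + 1
--     return array
-- ===== SOURCE B (Python) =====
-- def permutationToArray(permutation, bay):
--     """将排列转换为二维数组"""
--     bay[-1] = 1  # 将bay的最后一个元素设置为1 (same in-place mutation as A)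
--     _missing = object()
--     it = iter(permutation)
--     result = []
--     seg = []
--     for f in bay:
--         x = next(it, _missing)
--         if x is not _missing:
--             seg.append(x)
--         if f == 1:
--             result.append(seg)
--             seg = []
--     return result
-- ===== Notes on version B (the rewrite author's own statement) =====
-- stated objective: alternative
-- what changed: B streams the permutation through an iterator in lockstep with the bay flags, growing the current segment one element at a time and closing it on a flag, instead of A's index arithmetic with a running start pointer and slice extraction.
import Mathlib
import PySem

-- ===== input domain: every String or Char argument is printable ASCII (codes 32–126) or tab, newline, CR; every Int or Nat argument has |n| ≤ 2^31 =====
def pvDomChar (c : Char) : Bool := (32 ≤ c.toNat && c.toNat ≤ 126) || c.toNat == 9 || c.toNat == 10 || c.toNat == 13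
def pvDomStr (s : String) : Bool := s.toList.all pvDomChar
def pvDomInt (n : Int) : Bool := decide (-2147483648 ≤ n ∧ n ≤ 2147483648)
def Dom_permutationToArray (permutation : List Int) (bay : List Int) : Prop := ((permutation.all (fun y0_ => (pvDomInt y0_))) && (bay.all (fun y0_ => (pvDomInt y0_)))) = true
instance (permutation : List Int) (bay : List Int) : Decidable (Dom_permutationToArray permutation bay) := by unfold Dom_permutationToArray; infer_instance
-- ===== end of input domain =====

-- B streams the permutation element by element alongside the bay flags (no indices, no slicing),
-- instead of A's index/slice bookkeeping. Both A and B mutate `bay` in place (bay[-1] = 1);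
-- the equivalence proved here is about the return value, and both perform the identical mutation.

-- ===== PORT A =====
-- `bay[-1] = 1` : the mutated list is bay.dropLast ++ [1]; on bay = [] Python raises IndexError (excluded by Pre_).
def permutationToArray (permutation : List Int) (bay : List Int) : List (List Int) :=
  let bay' := bay.dropLast ++ [1]
  ((PySem.List.enumerate bay').foldl
    (fun st iv =>
      if iv.2 = 1 then
        (st.1 ++ [PySem.List.slice permutation (some st.2) (some (iv.1 + 1))], iv.1 + 1)
      else st)
    ([], 0)).1

-- ===== PORT B =====
-- `x = next(it, _missing); if x is not _missing: seg.append(x)` : take 1 / drop 1 on the unconsumed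
-- remainder of the iterator (appends nothing when the iterator is exhausted, exactly like the sentinel).
def permutationToArrayGo (perm : List Int) (flags : List Int)
    (seg : List Int) (result : List (List Int)) : List (List Int) :=
  match flags with
  | [] => result
  | f :: fr =>
    let seg' := seg ++ perm.take 1
    if f = 1 then permutationToArrayGo (perm.drop 1) fr [] (result ++ [seg'])
    else permutationToArrayGo (perm.drop 1) fr seg' result

def permutationToArray_alt (permutation : List Int) (bay : List Int) : List (List Int) :=
  let bay' := bay.dropLast ++ [1]
  permutationToArrayGo permutation bay' [] []

-- ===== PRECONDITION & SPEC =====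
-- Pre_ excludes exactly bay = [], where A raises IndexError on `bay[-1] = 1` (B raises there too).
def Pre_permutationToArray (permutation : List Int) (bay : List Int) : Prop := bay ≠ []
instance (permutation : List Int) (bay : List Int) : Decidable (Pre_permutationToArray permutation bay) := by unfold Pre_permutationToArray; infer_instance
def pvWitness_permutationToArray : List Int × List Int := ([1, 2, 3], [0, 1, 0])

def Spec_permutationToArray (permutation : List Int) (bay : List Int) (out : List (List Int)) : Prop := out = permutationToArray_alt permutation bay
instance (permutation : List Int) (bay : List Int) (out : List (List Int)) : Decidable (Spec_permutationToArray permutation bay out) := by unfold Spec_permutationToArray; infer_instance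

-- ===== CLAIM (what is proved, stated in full; the proofs are below) =====
def Claim_equal_permutationToArray : Prop := ∀ (permutation : List Int) (bay : List Int), Dom_permutationToArray permutation bay → Pre_permutationToArray permutation bay → Spec_permutationToArray permutation bay (permutationToArray permutation bay)

-- ===== LEMMAS AND PROOFS =====

-- Extending a prefix by the next element of the list.
theorem take_append_drop_take_one {α : Type} (xs : List α) (m : Nat) :
    xs.take m ++ (xs.drop m).take 1 = xs.take (m + 1) := by
  simp [List.take_add_one]

-- Loop invariant: A's scan over the flags enumerated from index k, with running start s ≤ k and
-- accumulated output `acc`, equals B's streaming recursion whose unconsumed iterator is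
-- `permutation.drop k` and whose current segment is the elements from s (exclusive of index k).
theorem permutationToArray_loop (permutation : List Int) (l : List Int) :
    ∀ (k s : Nat), s ≤ k → ∀ (acc : List (List Int)),
      ((PySem.List.enumerate l (k : Int)).foldl
        (fun st iv =>
          if iv.2 = 1 then
            (st.1 ++ [PySem.List.slice permutation (some st.2) (some (iv.1 + 1))], iv.1 + 1)
          else st)
        (acc, (s : Int))).1
      = permutationToArrayGo (permutation.drop k) l
          ((permutation.drop s).take (k - s)) acc := by
  induction l with
  | nil => intro k s _ acc; simp [PySem.List.enumerate_nil, permutationToArrayGo]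
  | cons v rest ih =>
    intro k s hsk acc
    rw [PySem.List.enumerate_cons]
    have hdrop : (permutation.drop s).drop (k - s) = permutation.drop k := by
      rw [List.drop_drop]; congr 1; omega
    have hseg : (permutation.drop s).take (k - s) ++ (permutation.drop k).take 1
        = (permutation.drop s).take (k + 1 - s) := by
      rw [← hdrop, take_append_drop_take_one]; congr 1; omega
    by_cases hv : v = 1
    · simp only [List.foldl_cons, hv, reduceIte, permutationToArrayGo]
      have hslice : PySem.List.slice permutation (some (s : Int)) (some ((k : Int) + 1))
          = (permutation.drop s).take (k + 1 - s) := by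
        have : ((k : Int) + 1) = ((k + 1 : Nat) : Int) := by push_cast; ring
        rw [this, PySem.List.slice_natCast]
      have hcast : ((k : Int) + 1) = ((k + 1 : Nat) : Int) := by push_cast; ring
      rw [hslice, hcast, ih (k + 1) (k + 1) (le_refl _)]
      simp [hseg, List.drop_drop]
    · simp only [List.foldl_cons, if_neg hv, permutationToArrayGo]
      have hcast : ((k : Int) + 1) = ((k + 1 : Nat) : Int) := by push_cast; ring
      rw [hcast, ih (k + 1) s (by omega)]
      simp [hseg, List.drop_drop]

-- ===== VERDICT (by name: the statement is the Claim_ definition above) =====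
theorem permutationToArray_spec : Claim_equal_permutationToArray := by
  unfold Claim_equal_permutationToArray
  intro permutation bay _ _
  unfold Spec_permutationToArray permutationToArray permutationToArray_alt
  simpa using permutationToArray_loop permutation (bay.dropLast ++ [1]) 0 0 (le_refl 0) []
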